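-- pv_equiv track=rewrite | github.com/siddacious/i2c_transactions_hla | register_decoder/decoder.py | _bitwise_diff
-- ===== SOURCE A (Python) =====
-- def _bitwise_diff(old_value, new_value):
--     #  out should be a set mask and an unset mask
--     if old_value is None:
--         old_value = 0
--
--     changed_bits = old_value ^ new_value
--     changes = []
--     for shift in range(7, -1, -1):
--         if changed_bits >>shift & 0b1:
--             new_bit_value = (new_value & 1<<shift) >> shift
--             changes.append((shift, new_bit_value))
--     return changes
-- ===== SOURCE B (Python) =====
-- def _bitwise_diff(old_value, new_value):
--     # Iterate only over the set bits of the masked diff, taking the highest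
--     # remaining bit each time, so entries come out high-to-low directly.
--     changed = ((old_value if old_value is not None else 0) ^ new_value) % 256
--     changes = []
--     while changed:
--         shift = changed.bit_length() - 1
--         changes.append((shift, (new_value & 1 << shift) >> shift))
--         changed -= 1 << shift
--     return changes
-- ===== Notes on version B (the rewrite author's own statement) =====
-- stated objective: alternative
-- what changed: Instead of scanning all eight bit positions with a range loop, B masks the xor to 8 bits and loops only over its set bits, peeling the highest remaining bit via bit_length each iteration, which yields the high-to-low order directly.
import Mathlib
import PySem

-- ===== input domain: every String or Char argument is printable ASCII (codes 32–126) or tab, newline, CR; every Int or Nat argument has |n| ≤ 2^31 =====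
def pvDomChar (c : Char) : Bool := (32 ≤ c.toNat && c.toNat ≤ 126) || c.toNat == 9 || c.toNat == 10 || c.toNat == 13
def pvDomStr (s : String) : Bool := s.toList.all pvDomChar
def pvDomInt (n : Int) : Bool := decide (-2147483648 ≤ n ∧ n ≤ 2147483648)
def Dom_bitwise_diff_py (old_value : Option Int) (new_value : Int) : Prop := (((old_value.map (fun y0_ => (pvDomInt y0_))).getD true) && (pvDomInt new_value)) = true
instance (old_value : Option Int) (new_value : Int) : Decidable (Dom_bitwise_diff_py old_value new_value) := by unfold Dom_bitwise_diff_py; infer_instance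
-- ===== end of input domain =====

-- B masks the xor to 8 bits and loops only over its set bits (peeling the highest
-- remaining bit via bit_length), instead of scanning all eight positions; same values.

-- ===== PORT A =====
-- the loop shifts are 7..0, all nonnegative, so `.toNat` on the pyRange element is exact
def bitwise_diff_py (old_value : Option Int) (new_value : Int) : List (Int × Int) :=
  let old := old_value.getD 0
  let changed_bits := PySem.Int.bxor old new_value
  (PySem.List.pyRange 7 (-1) (-1)).foldl
    (fun changes shift =>
      if PySem.Int.band (changed_bits >>> shift.toNat) 1 ≠ 0 then
        changes ++ [(shift, (PySem.Int.band new_value (1 <<< shift.toNat)) >>> shift.toNat)]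
      else changes) []

-- ===== PORT B =====
-- the while loop of Source B; `changed` is `x % 256`, nonnegative, carried as a Nat
def pvAltLoop (new_value : Int) (c : Nat) : List (Int × Int) :=
  if _hc : c = 0 then []
  else
    let shift := PySem.Int.bitLength (c : Int) - 1
    ((shift : Int), (PySem.Int.band new_value (((1 <<< shift : Nat) : Int))) >>> shift) ::
      pvAltLoop new_value (c - (1 <<< shift))
termination_by c
decreasing_by
  have hpos : 0 < 1 <<< (PySem.Int.bitLength (c : Int) - 1) := by
    rw [Nat.one_shiftLeft]; positivity
  omega

def bitwise_diff_py_alt (old_value : Option Int) (new_value : Int) : List (Int × Int) :=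
  let changed := PySem.Int.mod (PySem.Int.bxor (old_value.getD 0) new_value) 256
  pvAltLoop new_value changed.toNat

-- ===== PRECONDITION & SPEC =====
def Spec_bitwise_diff_py (old_value : Option Int) (new_value : Int) (out : List (Int × Int)) : Prop := out = bitwise_diff_py_alt old_value new_value
instance (old_value : Option Int) (new_value : Int) (out : List (Int × Int)) : Decidable (Spec_bitwise_diff_py old_value new_value out) := by unfold Spec_bitwise_diff_py; infer_instance

-- ===== CLAIM (what is proved, stated in full; the proofs are below) =====
def Claim_equal_bitwise_diff_py : Prop := ∀ (old_value : Option Int) (new_value : Int), Dom_bitwise_diff_py old_value new_value → Spec_bitwise_diff_py old_value new_value (bitwise_diff_py old_value new_value)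

-- ===== LEMMAS AND PROOFS =====

-- the list of (shift, new bit) pairs for bits n-1 .. 0 of c, read arithmetically
def pvBits (new_value : Int) (c : Nat) : Nat → List (Int × Int)
  | 0 => []
  | n+1 =>
      (if c / 2^n % 2 = 1 then
        [((n : Int), (PySem.Int.band new_value (((1 <<< n : Nat) : Int))) >>> n)] else [])
        ++ pvBits new_value c n

-- pvBits only reads the bits of c below n
lemma pvBits_congr (new_value : Int) (c d n : Nat)
    (h : ∀ s, s < n → c / 2^s % 2 = d / 2^s % 2) :
    pvBits new_value c n = pvBits new_value d n := by
  induction n with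
  | zero => rfl
  | succ n ih =>
      simp only [pvBits, h n (by omega), ih (fun s hs => h s (by omega))]

-- bits below s are unchanged by removing the bit at n > s
lemma sub_pow_bit (c n s : Nat) (hs : s < n) (hle : 2^n ≤ c) :
    (c - 2^n) / 2^s % 2 = c / 2^s % 2 := by
  have h1 : 2^n = 2^(n-s-1) * 2 * 2^s := by
    rw [mul_assoc, ← pow_succ']
    rw [← pow_add]
    congr 1
    omega
  obtain ⟨d, hd⟩ : ∃ d, c = d + 2^n := ⟨c - 2^n, by omega⟩
  subst hd
  rw [Nat.add_sub_cancel, h1, Nat.add_mul_div_right _ _ (Nat.two_pow_pos s),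
    Nat.add_mul_mod_self_right]

lemma loop_eq_bits (new_value : Int) (n : Nat) :
    ∀ c, c < 2^n → pvAltLoop new_value c = pvBits new_value c n := by
  induction n with
  | zero =>
      intro c hc
      interval_cases c
      rw [pvAltLoop]
      rfl
  | succ n ih =>
      intro c hc
      by_cases hlo : c < 2^n
      · -- top bit unset
        have htop : c / 2^n % 2 = 0 := by
          rw [Nat.div_eq_of_lt hlo]
        simp only [pvBits, htop]
        simpa using (ih c hlo).symm ▸ (ih c hlo)
      · -- top bit set
        rw [not_lt] at hlo
        have hc0 : c ≠ 0 := by have := Nat.two_pow_pos n; omega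
        -- bitLength determines the top bit
        set bl := PySem.Int.bitLength (c : Int) with hbl
        have h1 : 2^(bl-1) ≤ c := by
          have := PySem.Int.two_pow_bitLength_le (c : Int) (by exact_mod_cast hc0)
          simpa using this
        have h2 : c < 2^bl := by
          have := PySem.Int.lt_two_pow_bitLength (c : Int)
          simpa using this
        have hbl1 : 1 ≤ bl := by
          by_contra h
          have : bl = 0 := by omega
          rw [this] at h2; simp at h2; omega
        have hshift : bl - 1 = n := by
          have hlt1 : bl - 1 < n + 1 :=
            (Nat.pow_lt_pow_iff_right (a := 2) (by omega)).mp (by omega)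
          have hlt2 : n < bl :=
            (Nat.pow_lt_pow_iff_right (a := 2) (by omega)).mp (by omega)
          omega
        have htop : c / 2^n % 2 = 1 := by
          have h2n : (2:Nat)^(n+1) = 2^n * 2 := by rw [pow_succ]
          have : c / 2^n = 1 :=
            Nat.div_eq_of_lt_le (by omega) (by omega)
          rw [this]
        rw [pvAltLoop]
        simp only [hc0, dite_false]
        rw [← hbl, hshift, Nat.one_shiftLeft]
        have hrec : c - 2^n < 2^n := by omega
        rw [ih _ hrec, pvBits_congr new_value (c - 2^n) c n
          (fun s hs => sub_pow_bit c n s hs (by omega))]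
        simp only [pvBits, htop]
        simp [Nat.one_shiftLeft]

-- the bit test A performs equals the arithmetic bit of x % 256, for shifts 0..7
lemma cond_eq (x : Int) (s : Nat) (hs : s < 8) :
    (PySem.Int.band (x >>> s) 1 ≠ 0) ↔ ((x % 256).toNat / 2^s % 2 = 1) := by
  rw [PySem.Int.band_one, Int.shiftRight_eq_div_pow]
  have hm : ∀ a : Int, PySem.Int.mod a 2 = a % 2 := by
    intro a
    show a.fmod 2 = a % 2
    simp [Int.fmod_eq_emod]
  rw [hm]
  interval_cases s <;> norm_num <;> omega

-- descending shift list n-1 .. 0, as Ints (proof-side mirror of range(7,-1,-1))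
def pvDesc : Nat → List Int
  | 0 => []
  | n+1 => ((n : Int)) :: pvDesc n

lemma foldA (x new_value : Int) : ∀ (n : Nat), n ≤ 8 → ∀ acc : List (Int × Int),
    (pvDesc n).foldl
      (fun changes shift =>
        if PySem.Int.band (x >>> shift.toNat) 1 ≠ 0 then
          changes ++ [(shift, (PySem.Int.band new_value (1 <<< shift.toNat)) >>> shift.toNat)]
        else changes) acc
    = acc ++ pvBits new_value (x % 256).toNat n := by
  intro n
  induction n with
  | zero => intro _ acc; simp [pvDesc, pvBits]
  | succ n ih =>
      intro hn acc
      simp only [pvDesc, List.foldl_cons]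
      rw [ih (by omega)]
      simp only [Int.toNat_natCast, Int.shiftRight_natCast_right, pvBits]
      simp only [cond_eq x n (by omega)]
      split_ifs <;> simp

set_option maxHeartbeats 2000000 in
lemma main_eq (x new_value : Int) :
    (PySem.List.pyRange 7 (-1) (-1)).foldl
      (fun changes shift =>
        if PySem.Int.band (x >>> shift.toNat) 1 ≠ 0 then
          changes ++ [(shift, (PySem.Int.band new_value (1 <<< shift.toNat)) >>> shift.toNat)]
        else changes) []
    = pvAltLoop new_value (PySem.Int.mod x 256).toNat := by
  have hmod : PySem.Int.mod x 256 = x % 256 := by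
    show x.fmod 256 = x % 256
    simp [Int.fmod_eq_emod]
  have hlt : (x % 256).toNat < 2^8 := by
    have := Int.emod_lt_of_pos x (show (0:Int) < 256 by norm_num)
    omega
  rw [hmod, loop_eq_bits new_value 8 _ hlt]
  rw [show PySem.List.pyRange 7 (-1) (-1) = pvDesc 8 from by decide]
  rw [foldA x new_value 8 (by omega) []]
  simp

-- ===== VERDICT (by name: the statement is the Claim_ definition above) =====
theorem bitwise_diff_py_spec : Claim_equal_bitwise_diff_py := by
  intro old_value new_value _
  show _ = _
  unfold bitwise_diff_py bitwise_diff_py_alt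
  exact main_eq (PySem.Int.bxor (old_value.getD 0) new_value) new_value
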